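-- pv_equiv track=rewrite | github.com/1933211129/dimensional-reduction | algorithm1.py | _greedy_minimal_hitting_set
-- ===== SOURCE A (Python) =====
-- from typing import Dict, Iterable, List, Optional, Sequence, Set, FrozenSet, Tuple
--
-- def _is_hitting_set(candidate: Set[str], clauses: Sequence[Set[str]]) -> bool:
--     return all(candidate.intersection(clause) for clause in clauses)
--
-- def _greedy_minimal_hitting_set(
--     clauses: Sequence[FrozenSet[str]],
-- ) -> FrozenSet[str]:
--     clause_sets = [set(clause) for clause in clauses if clause]
--     if not clause_sets:
--         return frozenset()
--
--     uncovered = list(clause_sets)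
--     selected: Set[str] = set()
--
--     while uncovered:
--         frequency: Dict[str, int] = {}
--         for clause in uncovered:
--             for attribute in clause:
--                 frequency[attribute] = frequency.get(attribute, 0) + 1
--         attribute, _ = min(
--             frequency.items(), key=lambda item: (-item[1], item[0])
--         )
--         selected.add(attribute)
--         uncovered = [clause for clause in uncovered if attribute not in clause]
--
--     for attribute in sorted(list(selected)):
--         candidate = set(selected)
--         candidate.remove(attribute)
--         if _is_hitting_set(candidate, clause_sets):
--             selected = candidate
--
--     return frozenset(sorted(selected))
-- ===== SOURCE B (Python) =====
-- def _greedy_minimal_hitting_set(clauses):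
--     clause_sets = [set(clause) for clause in clauses if clause]
--     if not clause_sets:
--         return frozenset()
--
--     # one counting pass; counts are maintained by decrements afterwards, never rebuilt
--     freq = {}
--     for clause in clause_sets:
--         for attribute in clause:
--             freq[attribute] = freq.get(attribute, 0) + 1
--
--     uncovered = list(clause_sets)
--     chosen = []
--     while uncovered:
--         best = min(freq, key=lambda a: (-freq[a], a))
--         chosen.append(best)
--         remaining = []
--         for clause in uncovered:
--             if best in clause:
--                 for attribute in clause:
--                     if freq[attribute] == 1:
--                         del freq[attribute]
--                     else:
--                         freq[attribute] -= 1
--             else: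
--                 remaining.append(clause)
--         uncovered = remaining
--
--     # redundancy elimination driven by per-clause hit counters
--     keep = set(chosen)
--     hits = [len(clause & keep) for clause in clause_sets]
--     for attribute in sorted(keep):
--         if all(h >= 2 for clause, h in zip(clause_sets, hits) if attribute in clause):
--             keep.discard(attribute)
--             hits = [h - 1 if attribute in clause else h
--                     for clause, h in zip(clause_sets, hits)]
--     return frozenset(sorted(keep))
-- ===== Notes on version B (the rewrite author's own statement) =====
-- stated objective: alternative
-- what changed: B builds the attribute-frequency counter once and maintains it by decrements during a single 'remaining' pass per round instead of rebuilding the frequency dict over all uncovered clauses every greedy round, and replaces the minimization pass's set-copy/intersection recheck by per-clause hit counters updated decrementally.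
import Mathlib
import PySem

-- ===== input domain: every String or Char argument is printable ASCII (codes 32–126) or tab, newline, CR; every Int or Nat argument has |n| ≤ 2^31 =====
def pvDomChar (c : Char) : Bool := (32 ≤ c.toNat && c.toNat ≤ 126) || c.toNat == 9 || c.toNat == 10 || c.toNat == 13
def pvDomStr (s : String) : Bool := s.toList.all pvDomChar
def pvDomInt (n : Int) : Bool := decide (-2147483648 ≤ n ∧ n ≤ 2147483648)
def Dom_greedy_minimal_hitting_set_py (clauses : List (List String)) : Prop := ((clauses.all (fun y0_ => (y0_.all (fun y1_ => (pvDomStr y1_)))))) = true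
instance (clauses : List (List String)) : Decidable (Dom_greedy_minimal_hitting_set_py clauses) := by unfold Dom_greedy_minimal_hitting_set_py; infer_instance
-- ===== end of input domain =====

-- B replaces A's per-round frequency-dict rebuild with ONE counting pass whose counts are then
-- maintained by decrements, and A's copy-remove/intersection minimization pass with per-clause
-- hit counters updated decrementally (objective: alternative; measured cost comparable to A's).

-- ===== PORT A =====
-- all(candidate.intersection(clause) for clause in clauses)
def gmhsIsHittingSet (candidate : PySem.Set String) (clauses : List (PySem.Set String)) : Bool :=
  clauses.all (fun clause => !(PySem.Set.inter candidate clause).isEmpty)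

-- frequency[attribute] = frequency.get(attribute, 0) + 1, rebuilt over uncovered every round
def gmhsFreq (uncovered : List (PySem.Set String)) : PySem.Dict String Int :=
  uncovered.foldl (fun d clause => clause.foldl (fun d a => d.modify a 0 (fun x => x + 1)) d)
    PySem.Dict.empty

-- the while-loop of A; fuel = number of uncovered clauses (each round removes at least one)
def gmhsLoopA : Nat → List (PySem.Set String) → PySem.Set String → PySem.Set String
  | 0, _, selected => selected
  | fuel+1, uncovered, selected =>
    if uncovered.isEmpty then selected
    else
      match PySem.List.min2? (gmhsFreq uncovered).items (fun it => -it.2) (fun it => it.1) with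
      | none => selected
      | some (attr, _) =>
          gmhsLoopA fuel (uncovered.filter (fun clause => !(PySem.Set.contains clause attr)))
            (PySem.Set.add selected attr)

-- the redundancy-elimination for-loop of A
def gmhsPruneA (clauseSets : List (PySem.Set String)) (selected : PySem.Set String) :
    PySem.Set String :=
  (PySem.List.sorted selected (fun x => x) false).foldl
    (fun sel attr =>
      match PySem.Set.remove? (PySem.Set.ofList sel) attr with
      | none => sel
      | some candidate => if gmhsIsHittingSet candidate clauseSets then candidate else sel)
    selected

def greedy_minimal_hitting_set_py (clauses : List (List String)) : List String :=
  let clauseSets : List (PySem.Set String) :=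
    (clauses.filter (fun c => !c.isEmpty)).map (fun c => PySem.Set.ofList c)
  if clauseSets.isEmpty then []
  else
    let selected := gmhsLoopA clauseSets.length clauseSets PySem.Set.empty
    PySem.List.sorted (gmhsPruneA clauseSets selected) (fun x => x) false

-- ===== PORT B =====
-- the single counting pass: freq[attribute] = freq.get(attribute, 0) + 1 over all clause sets
def gmhsFreqB (clauseSets : List (PySem.Set String)) : PySem.Dict String Int :=
  clauseSets.foldl (fun d clause => clause.foldl (fun d a => d.modify a 0 (fun x => x + 1)) d)
    PySem.Dict.empty

-- inner decrement loop: 'if freq[attribute] == 1: del freq[attribute] else: freq[attribute] -= 1'.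
-- freq[attribute] is a raising lookup; every attribute of an uncovered clause is a key of freq
-- (counts cover exactly the uncovered clauses), so getD _ 0 is exact here.
def gmhsDecClause (d : PySem.Dict String Int) (clause : PySem.Set String) :
    PySem.Dict String Int :=
  clause.foldl (fun d a => if d.getD a 0 == 1 then d.erase a else d.modify a 0 (fun v => v - 1)) d

-- one round: build 'remaining' and update counts in a single pass over uncovered
def gmhsRoundB (best : String) (uncovered : List (PySem.Set String))
    (freq : PySem.Dict String Int) : List (PySem.Set String) × PySem.Dict String Int :=
  uncovered.foldl
    (fun st clause =>
      if PySem.Set.contains clause best then (st.1, gmhsDecClause st.2 clause)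
      else (st.1 ++ [clause], st.2))
    ([], freq)

-- the while-loop of B; fuel = number of uncovered clauses (each round removes at least one);
-- min(freq, key=lambda a: (-freq[a], a)) iterates the dict's keys (freq[a] is a keyed lookup: exact via getD)
def gmhsLoopB : Nat → List (PySem.Set String) → PySem.Dict String Int → List String → List String
  | 0, _, _, chosen => chosen
  | fuel+1, uncovered, freq, chosen =>
    if uncovered.isEmpty then chosen
    else
      match PySem.List.min2? freq.keys (fun a => -(freq.getD a 0)) (fun a => a) with
      | none => chosen
      | some best =>
          let st := gmhsRoundB best uncovered freq
          gmhsLoopB fuel st.1 st.2 (chosen ++ [best])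

-- one minimization step on the state (keep, hits)
def gmhsPruneStepB (clauseSets : List (PySem.Set String))
    (st : PySem.Set String × List Int) (a : String) : PySem.Set String × List Int :=
  if ((clauseSets.zip st.2).filter (fun p => PySem.Set.contains p.1 a)).all
      (fun p => decide (2 ≤ p.2)) then
    (PySem.Set.discard st.1 a,
     (clauseSets.zip st.2).map (fun p => if PySem.Set.contains p.1 a then p.2 - 1 else p.2))
  else st

def greedy_minimal_hitting_set_py_alt (clauses : List (List String)) : List String :=
  let clauseSets : List (PySem.Set String) :=
    (clauses.filter (fun c => !c.isEmpty)).map (fun c => PySem.Set.ofList c)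
  if clauseSets.isEmpty then []
  else
    let chosen := gmhsLoopB clauseSets.length clauseSets (gmhsFreqB clauseSets) []
    let keep0 := PySem.Set.ofList chosen
    let hits0 := clauseSets.map (fun clause => PySem.Set.len (PySem.Set.inter clause keep0))
    let st := (PySem.List.sorted keep0 (fun x => x) false).foldl (gmhsPruneStepB clauseSets)
      (keep0, hits0)
    PySem.List.sorted st.1 (fun x => x) false

-- ===== PRECONDITION & SPEC =====
def Spec_greedy_minimal_hitting_set_py (clauses : List (List String)) (out : List String) : Prop := out = greedy_minimal_hitting_set_py_alt clauses
instance (clauses : List (List String)) (out : List String) : Decidable (Spec_greedy_minimal_hitting_set_py clauses out) := by unfold Spec_greedy_minimal_hitting_set_py; infer_instance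

-- ===== CLAIM (what is proved, stated in full; the proofs are below) =====
def Claim_equal_greedy_minimal_hitting_set_py : Prop := ∀ (clauses : List (List String)), Dom_greedy_minimal_hitting_set_py clauses → Spec_greedy_minimal_hitting_set_py clauses (greedy_minimal_hitting_set_py clauses)

-- ===== LEMMAS AND PROOFS =====

-- the lexicographic "not worse" order both minima realise
def gmhsLe {α : Type} (k1 : α → Int) (k2 : α → String) (x y : α) : Prop :=
  (k1 x < k1 y) ∨ (k1 x = k1 y ∧ k2 x ≤ k2 y)

-- extensional description of B's maintained freq dict: counts of the uncovered clauses
def gmhsFreqInv (u : List (PySem.Set String)) (d : PySem.Dict String Int) : Prop :=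
  (∀ a : String, d.getD a 0 = ((u.flatMap (fun c => c)).count a : Int)) ∧
  (∀ a : String, a ∈ d.keys ↔ a ∈ u.flatMap (fun c => c)) ∧
  d.keys.Nodup

lemma gmhsLe_refl {α : Type} (k1 : α → Int) (k2 : α → String) (x : α) : gmhsLe k1 k2 x x :=
  Or.inr ⟨rfl, le_refl _⟩

lemma gmhsLe_trans {α : Type} {k1 : α → Int} {k2 : α → String} {x y z : α}
    (h1 : gmhsLe k1 k2 x y) (h2 : gmhsLe k1 k2 y z) : gmhsLe k1 k2 x z := by
  rcases h1 with h1 | ⟨h1, h1'⟩ <;> rcases h2 with h2 | ⟨h2, h2'⟩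
  · exact Or.inl (lt_trans h1 h2)
  · exact Or.inl (h2 ▸ h1)
  · exact Or.inl (h1 ▸ h2)
  · exact Or.inr ⟨h1.trans h2, le_trans h1' h2'⟩

lemma min2?_cons_cons {α : Type} (k1 : α → Int) (k2 : α → String) (i x : α) (t : List α) :
    PySem.List.min2? (i :: x :: t) k1 k2
      = PySem.List.min2?
          ((if (decide (k1 x < k1 i) || (!decide (k1 i < k1 x) && decide (k2 x < k2 i))) = true
            then x else i) :: t) k1 k2 := by
  simp only [PySem.List.min2?, List.foldl_cons]
  split <;> rfl

lemma min2?_char {α : Type} (k1 : α → Int) (k2 : α → String) :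
    ∀ (xs : List α) (i : α),
    ∃ m, PySem.List.min2? (i :: xs) k1 k2 = some m ∧
      m ∈ i :: xs ∧ ∀ y ∈ i :: xs, gmhsLe k1 k2 m y := by
  intro xs
  induction xs with
  | nil =>
    intro i
    refine ⟨i, by simp [PySem.List.min2?], by simp, ?_⟩
    intro y hy; simp at hy; subst hy; exact gmhsLe_refl _ _ _
  | cons x t ih =>
    intro i
    rw [min2?_cons_cons]
    set j := if (decide (k1 x < k1 i) || (!decide (k1 i < k1 x) && decide (k2 x < k2 i))) = true
      then x else i with hj
    have hji : gmhsLe k1 k2 j i ∧ gmhsLe k1 k2 j x := by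
      rw [hj]; split
      · next hc =>
        simp only [Bool.or_eq_true, Bool.and_eq_true, Bool.not_eq_true', decide_eq_true_eq,
          decide_eq_false_iff_not] at hc
        refine ⟨?_, gmhsLe_refl _ _ _⟩
        by_cases hlt : k1 x < k1 i
        · exact Or.inl hlt
        · rcases hc with hc | ⟨hc1, hc2⟩
          · exact absurd hc hlt
          · exact Or.inr ⟨le_antisymm (not_lt.mp hc1) (not_lt.mp hlt), le_of_lt hc2⟩
      · next hc =>
        simp only [Bool.or_eq_true, Bool.and_eq_true, Bool.not_eq_true', decide_eq_true_eq,
          decide_eq_false_iff_not] at hc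
        push Not at hc
        obtain ⟨hc1, hc2⟩ := hc
        refine ⟨gmhsLe_refl _ _ _, ?_⟩
        by_cases hB : k1 i < k1 x
        · exact Or.inl hB
        · have he : k1 i = k1 x := le_antisymm hc1 (not_lt.mp hB)
          exact Or.inr ⟨he, hc2 (not_lt.mp hB)⟩
    obtain ⟨m, h1, h2, h3⟩ := ih j
    refine ⟨m, h1, ?_, ?_⟩
    · rcases List.mem_cons.mp h2 with rfl | hm
      · rw [hj]; split <;> simp
      · simp [hm]
    · intro y hy
      have hmj : gmhsLe k1 k2 m j := h3 j (by simp)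
      rcases List.mem_cons.mp hy with rfl | hy'
      · exact gmhsLe_trans hmj hji.1
      rcases List.mem_cons.mp hy' with rfl | hy''
      · exact gmhsLe_trans hmj hji.2
      · exact h3 y (by simp [hy''])

-- ---- facts about Dict.erase (no library lemmas exist for erase) ----
lemma gmhs_find?_filter_ne {ν : Type} (k k' : String) (hne : k' ≠ k) :
    ∀ (l : List (String × ν)),
      (l.filter (fun p => !(p.1 == k))).find? (fun p => p.1 == k')
        = l.find? (fun p => p.1 == k') := by
  intro l
  induction l with
  | nil => rfl
  | cons p t ih =>
    by_cases hk : p.1 = k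
    · have h1 : (p.1 == k) = true := by simp [hk]
      have h2 : (p.1 == k') = false := by
        rw [beq_eq_false_iff_ne, hk]; exact fun h => hne h.symm
      simp [h1, h2, ih]
    · have h1 : (p.1 == k) = false := by simp [hk]
      by_cases hk' : p.1 = k'
      · have h2 : (p.1 == k') = true := by simp [hk']
        simp [h1, h2]
      · have h2 : (p.1 == k') = false := by simp [hk']
        simp [h1, h2, ih]

lemma gmhs_getD_erase {ν : Type} (d : PySem.Dict String ν) (k k' : String) (dflt : ν) :
    (d.erase k).getD k' dflt = if k' = k then dflt else d.getD k' dflt := by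
  by_cases h : k' = k
  · subst h
    have : (d.items.filter (fun p => !(p.1 == k'))).find? (fun p => p.1 == k') = none := by
      rw [List.find?_eq_none]
      intro p hp
      have := (List.mem_filter.mp hp).2
      simpa using this
    simp [PySem.Dict.erase, PySem.Dict.getD, PySem.Dict.get?, this]
  · simp [PySem.Dict.erase, PySem.Dict.getD, PySem.Dict.get?, gmhs_find?_filter_ne k k' h, h]

lemma gmhs_keys_erase {ν : Type} (d : PySem.Dict String ν) (k : String) :
    (d.erase k).keys = d.keys.filter (fun x => !(x == k)) := by
  simp [PySem.Dict.erase, PySem.Dict.keys, List.filter_map, Function.comp_def]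

lemma gmhs_mem_keys_erase {ν : Type} (d : PySem.Dict String ν) (k x : String) :
    x ∈ (d.erase k).keys ↔ x ∈ d.keys ∧ x ≠ k := by
  rw [gmhs_keys_erase, List.mem_filter]
  simp

lemma gmhs_nodup_keys_erase {ν : Type} (d : PySem.Dict String ν) (k : String)
    (h : d.keys.Nodup) : (d.erase k).keys.Nodup := by
  rw [gmhs_keys_erase]; exact h.filter _

-- ---- the inner decrement loop over one (nodup) clause whose attributes are all keys ----
lemma decClause_spec : ∀ (clause : List String) (d : PySem.Dict String Int),
    clause.Nodup → d.keys.Nodup → (∀ a ∈ clause, a ∈ d.keys) →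
    (∀ x, (gmhsDecClause d clause).getD x 0 = d.getD x 0 - (clause.count x : Int)) ∧
    (∀ x, x ∈ (gmhsDecClause d clause).keys ↔
      x ∈ d.keys ∧ ¬(x ∈ clause ∧ d.getD x 0 = 1)) ∧
    (gmhsDecClause d clause).keys.Nodup := by
  intro clause
  induction clause with
  | nil =>
    intro d _ hnd _
    refine ⟨fun x => by simp [gmhsDecClause], fun x => by simp [gmhsDecClause], hnd⟩
  | cons a rest ih =>
    intro d hcl hnd hkeys
    have ha : a ∈ d.keys := hkeys a (by simp)
    have hrest_nodup : rest.Nodup := hcl.of_cons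
    have hanr : a ∉ rest := by
      intro h; exact (List.nodup_cons.mp hcl).1 h
    -- the single step
    set d1 := if (d.getD a 0 == 1) = true then d.erase a else d.modify a 0 (fun v => v - 1)
      with hd1
    have hstep : gmhsDecClause d (a :: rest) = gmhsDecClause d1 rest := by
      simp only [gmhsDecClause, List.foldl_cons, hd1]
    have h1getD : ∀ x, d1.getD x 0 = if x = a then d.getD a 0 - 1 else d.getD x 0 := by
      intro x
      rw [hd1]
      split
      · next hone =>
        have hone' : d.getD a 0 = 1 := by simpa using hone
        rw [gmhs_getD_erase]
        split
        · next hxa => simp [hone']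
        · rfl
      · rw [PySem.Dict.getD_modify]
    have h1keys : ∀ x, x ∈ d1.keys ↔ x ∈ d.keys ∧ ¬(x = a ∧ d.getD a 0 = 1) := by
      intro x
      rw [hd1]
      split
      · next hone =>
        have hone' : d.getD a 0 = 1 := by simpa using hone
        rw [gmhs_mem_keys_erase]
        simp [hone']
      · next hone =>
        have hone' : ¬ d.getD a 0 = 1 := by simpa using hone
        rw [PySem.Dict.keys_modify]
        have hc : d.contains a = true := (PySem.Dict.contains_iff_mem_keys d a).mpr ha
        rw [PySem.Dict.keys_insert_of_contains _ _ hc]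
        simp [hone']
    have h1nodup : d1.keys.Nodup := by
      rw [hd1]
      split
      · exact gmhs_nodup_keys_erase _ _ hnd
      · rw [PySem.Dict.keys_modify]
        have hc : d.contains a = true := (PySem.Dict.contains_iff_mem_keys d a).mpr ha
        rw [PySem.Dict.keys_insert_of_contains _ _ hc]
        exact hnd
    have h1mem : ∀ b ∈ rest, b ∈ d1.keys := by
      intro b hb
      rw [h1keys]
      refine ⟨hkeys b (by simp [hb]), ?_⟩
      rintro ⟨rfl, _⟩
      exact hanr hb
    obtain ⟨ihg, ihk, ihn⟩ := ih d1 hrest_nodup h1nodup h1mem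
    rw [hstep]
    refine ⟨?_, ?_, ihn⟩
    · intro x
      rw [ihg x, h1getD x]
      by_cases hxa : x = a
      · subst hxa
        have : rest.count x = 0 := List.count_eq_zero.mpr hanr
        simp [this, List.count_cons_self]
      · rw [if_neg hxa]
        have : (a :: rest).count x = rest.count x := List.count_cons_of_ne (Ne.symm hxa)
        rw [this]
    · intro x
      rw [ihk x, h1keys x, h1getD x]
      by_cases hxa : x = a
      · subst hxa
        have hnr : x ∉ rest := hanr
        simp [hnr]
      · simp [hxa]

lemma gmhs_foldl_flatMap {α β σ : Type} (l : List α) (g : α → List β) (f : σ → β → σ) (i : σ) :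
    l.foldl (fun acc x => (g x).foldl f acc) i = (l.flatMap g).foldl f i := by
  induction l generalizing i with
  | nil => simp
  | cons x t ih => simp [List.flatMap_cons, List.foldl_append, ih]

lemma gmhsFreqB_eq_counter (cs : List (PySem.Set String)) :
    gmhsFreqB cs = PySem.Dict.counter (cs.flatMap (fun c => c)) := by
  rw [PySem.Dict.counter_eq_foldl]
  exact gmhs_foldl_flatMap cs (fun c => c) _ _

lemma gmhsFreq_eq_counter (uncovered : List (PySem.Set String)) :
    gmhsFreq uncovered = PySem.Dict.counter (uncovered.flatMap (fun c => c)) := by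
  rw [PySem.Dict.counter_eq_foldl]
  exact gmhs_foldl_flatMap uncovered (fun c => c) _ _

lemma gmhsFreqB_inv (cs : List (PySem.Set String)) : gmhsFreqInv cs (gmhsFreqB cs) := by
  rw [gmhsFreqB_eq_counter]
  refine ⟨fun a => PySem.Dict.getD_counter _ _, fun a => ?_, PySem.Dict.nodup_keys_counter _⟩
  rw [PySem.Dict.keys_counter, PySem.Set.mem_ofList]

-- one greedy round of B: the 'remaining'/decrement pass over uncovered
lemma roundB_fold (best : String) : ∀ (u : List (PySem.Set String))
    (acc : List (PySem.Set String)) (d : PySem.Dict String Int) (E : String → Int),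
    (∀ c ∈ u, (c : List String).Nodup) →
    (∀ x, 0 ≤ E x) →
    (∀ x, d.getD x 0 = ((u.flatMap (fun c => c)).count x : Int) + E x) →
    (∀ x, x ∈ d.keys ↔ 0 < ((u.flatMap (fun c => c)).count x : Int) + E x) →
    d.keys.Nodup →
    ∃ d', u.foldl (fun st clause =>
        if PySem.Set.contains clause best then (st.1, gmhsDecClause st.2 clause)
        else (st.1 ++ [clause], st.2)) (acc, d)
      = (acc ++ u.filter (fun c => !(PySem.Set.contains c best)), d')
    ∧ (∀ x, d'.getD x 0
        = (((u.filter (fun c => !(PySem.Set.contains c best))).flatMap (fun c => c)).count x : Int)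
          + E x)
    ∧ (∀ x, x ∈ d'.keys ↔
        0 < (((u.filter (fun c => !(PySem.Set.contains c best))).flatMap (fun c => c)).count x : Int)
          + E x)
    ∧ d'.keys.Nodup := by
  intro u
  induction u with
  | nil =>
    intro acc d E _ _ hg hk hn
    exact ⟨d, by simp, by simpa using hg, by simpa using hk, hn⟩
  | cons c u' ih =>
    intro acc d E hnd hE hg hk hn
    have hcnd : (c : List String).Nodup := hnd c (by simp)
    have hcount_cons : ∀ x, (((c :: u').flatMap (fun c => c)).count x : Int)
        = ((c : List String).count x : Int) + ((u'.flatMap (fun c => c)).count x : Int) := by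
      intro x
      rw [List.flatMap_cons, List.count_append]
      push_cast
      ring
    rw [List.foldl_cons]
    by_cases hc : PySem.Set.contains c best = true
    · rw [if_pos hc]
      have hmem : ∀ a ∈ (c : List String), a ∈ d.keys := by
        intro a ha
        rw [hk a]
        have h1 : 1 ≤ ((c : List String).count a : Int) := by
          have := List.count_pos_iff.mpr ha
          omega
        have := hcount_cons a
        have h2 : (0:Int) ≤ ((u'.flatMap (fun c => c)).count a : Int) := by positivity
        have := hE a
        omega
      obtain ⟨g1, k1, n1⟩ := decClause_spec c d hcnd hn hmem
      have hg1 : ∀ x, (gmhsDecClause d c).getD x 0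
          = ((u'.flatMap (fun c => c)).count x : Int) + E x := by
        intro x
        rw [g1 x, hg x, hcount_cons x]
        ring
      have hk1 : ∀ x, x ∈ (gmhsDecClause d c).keys ↔
          0 < ((u'.flatMap (fun c => c)).count x : Int) + E x := by
        intro x
        rw [k1 x, hk x, hg x, hcount_cons x]
        by_cases hxc : x ∈ (c : List String)
        · have hc1 : (c : List String).count x = 1 := List.count_eq_one_of_mem hcnd hxc
          have h2 : (0:Int) ≤ ((u'.flatMap (fun c => c)).count x : Int) := by positivity
          have := hE x
          rw [hc1]
          constructor
          · rintro ⟨_, h⟩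
            by_contra hle
            exact h ⟨hxc, by omega⟩
          · intro h
            refine ⟨by omega, ?_⟩
            rintro ⟨_, heq⟩
            omega
        · have hc0 : (c : List String).count x = 0 := List.count_eq_zero.mpr hxc
          rw [hc0]
          simp [hxc]
      obtain ⟨d', hfold, hg', hk', hn'⟩ := ih acc (gmhsDecClause d c) E
        (fun cc hcc => hnd cc (by simp [hcc])) hE hg1 hk1 n1
      have hfc : List.filter (fun cl => !PySem.Set.contains cl best) (c :: u')
          = List.filter (fun cl => !PySem.Set.contains cl best) u' := by
        rw [List.filter_cons, hc]; simp
      refine ⟨d', ?_, ?_, ?_, hn'⟩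
      · rw [hfold, hfc]
      · intro x; rw [hg' x, hfc]
      · intro x; rw [hk' x, hfc]
    · rw [if_neg hc]
      have hg2 : ∀ x, d.getD x 0 = ((u'.flatMap (fun c => c)).count x : Int)
          + (E x + ((c : List String).count x : Int)) := by
        intro x; rw [hg x, hcount_cons x]; ring
      have hk2 : ∀ x, x ∈ d.keys ↔ 0 < ((u'.flatMap (fun c => c)).count x : Int)
          + (E x + ((c : List String).count x : Int)) := by
        intro x; rw [hk x, hcount_cons x]
        constructor <;> intro h <;> omega
      have hE2 : ∀ x, 0 ≤ E x + ((c : List String).count x : Int) := by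
        intro x
        have := hE x
        positivity
      obtain ⟨d', hfold, hg', hk', hn'⟩ := ih (acc ++ [c]) d
        (fun x => E x + ((c : List String).count x : Int))
        (fun cc hcc => hnd cc (by simp [hcc])) hE2 hg2 hk2 hn
      have hcf : PySem.Set.contains c best = false := eq_false_of_ne_true hc
      have hfc : List.filter (fun cl => !PySem.Set.contains cl best) (c :: u')
          = c :: List.filter (fun cl => !PySem.Set.contains cl best) u' := by
        rw [List.filter_cons, hcf]; simp
      refine ⟨d', ?_, ?_, ?_, hn'⟩
      · rw [hfold, hfc, List.append_assoc]
        rfl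
      · intro x
        rw [hg' x, hfc, List.flatMap_cons, List.count_append]
        push_cast
        ring
      · intro x
        rw [hk' x, hfc, List.flatMap_cons, List.count_append]
        constructor <;> intro h <;> push_cast at * <;> omega

lemma roundB_spec (best : String) (u : List (PySem.Set String)) (d : PySem.Dict String Int)
    (hnd : ∀ c ∈ u, (c : List String).Nodup) (hInv : gmhsFreqInv u d) :
    ∃ d', gmhsRoundB best u d = (u.filter (fun c => !(PySem.Set.contains c best)), d')
      ∧ gmhsFreqInv (u.filter (fun c => !(PySem.Set.contains c best))) d' := by
  obtain ⟨hg, hk, hn⟩ := hInv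
  have hg0 : ∀ x, d.getD x 0 = ((u.flatMap (fun c => c)).count x : Int) + (fun _ => (0:Int)) x := by
    intro x; rw [hg x]; ring
  have hk0 : ∀ x, x ∈ d.keys ↔ 0 < ((u.flatMap (fun c => c)).count x : Int) + (fun _ => (0:Int)) x := by
    intro x
    rw [hk x]
    have := List.count_pos_iff (a := x) (l := u.flatMap (fun c => c))
    constructor <;> intro h
    · have := this.mpr h; push_cast; omega
    · apply this.mp; push_cast at h; omega
  obtain ⟨d', hfold, hg', hk', hn'⟩ := roundB_fold best u [] d (fun _ => 0) hnd
    (fun _ => le_refl 0) hg0 hk0 hn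
  refine ⟨d', ?_, ?_, ?_, hn'⟩
  · rw [gmhsRoundB, hfold]
    simp
  · intro x
    rw [hg' x]
    ring
  · intro x
    rw [hk' x]
    have := List.count_pos_iff (a := x)
      (l := (u.filter (fun c => !(PySem.Set.contains c best))).flatMap (fun c => c))
    constructor <;> intro h
    · apply this.mp; push_cast at h; omega
    · have := this.mpr h; push_cast; omega

-- A's min over the rebuilt frequency items picks the same attribute as B's min over the
-- maintained dict's keys
lemma pick_eq (u : List (PySem.Set String)) (d : PySem.Dict String Int)
    (hInv : gmhsFreqInv u d) :
    (PySem.List.min2? (gmhsFreq u).items (fun it => -it.2) (fun it => it.1)).map Prod.fst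
      = PySem.List.min2? d.keys (fun a => -(d.getD a 0)) (fun a => a) := by
  obtain ⟨hg, hkm, hn⟩ := hInv
  rw [gmhsFreq_eq_counter, PySem.Dict.items_counter]
  cases hof : PySem.Set.ofList (u.flatMap (fun c => c)) with
  | nil =>
    have hflatnil : u.flatMap (fun c => c) = [] := by
      cases hfe : u.flatMap (fun c => c) with
      | nil => rfl
      | cons y ys =>
        exfalso
        have hy : y ∈ PySem.Set.ofList (u.flatMap (fun c => c)) :=
          (PySem.Set.mem_ofList _ _).mpr (by rw [hfe]; simp)
        rw [hof] at hy
        cases hy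
    have hkeys : d.keys = [] := by
      rw [List.eq_nil_iff_forall_not_mem]
      intro x hx
      have := (hkm x).mp hx
      rw [hflatnil] at this
      cases this
    rw [hkeys]
    simp [PySem.List.min2?]
  | cons k0 ks =>
    rw [List.map_cons]
    obtain ⟨mA, hA1, hA2, hA3⟩ := min2?_char (fun it : String × Int => -it.2)
      (fun it => it.1) (ks.map (fun k => (k, ((u.flatMap (fun c => c)).count k : Int))))
      (k0, ((u.flatMap (fun c => c)).count k0 : Int))
    rw [hA1]
    have hmemflat : ∀ x : String, x ∈ k0 :: ks ↔ x ∈ u.flatMap (fun c => c) := by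
      intro x
      rw [← hof, PySem.Set.mem_ofList]
    have hk0keys : k0 ∈ d.keys := (hkm k0).mpr ((hmemflat k0).mp (by simp))
    cases hkeys : d.keys with
    | nil => rw [hkeys] at hk0keys; cases hk0keys
    | cons b kt =>
      obtain ⟨mB, hB1, hB2, hB3⟩ := min2?_char (fun a => -(d.getD a 0)) (fun a => a) kt b
      rw [hB1]
      -- mA is (xA, count xA) for some attribute xA
      have hA2' : mA ∈ (k0 :: ks).map (fun k => (k, ((u.flatMap (fun c => c)).count k : Int))) := by
        rw [List.map_cons]; exact hA2
      obtain ⟨xA, hxA, rfl⟩ := List.mem_map.mp hA2'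
      -- mB is an attribute of flat
      have hmBkeys : mB ∈ d.keys := by rw [hkeys]; exact hB2
      have hmBflat : mB ∈ k0 :: ks := (hmemflat mB).mpr ((hkm mB).mp hmBkeys)
      have hxAkeys : xA ∈ d.keys := (hkm xA).mpr ((hmemflat xA).mp hxA)
      -- minimality of mA at mB's item
      have h1 := hA3 (mB, ((u.flatMap (fun c => c)).count mB : Int))
        (by
          have : (mB, ((u.flatMap (fun c => c)).count mB : Int))
              ∈ (k0 :: ks).map (fun k => (k, ((u.flatMap (fun c => c)).count k : Int))) :=
            List.mem_map_of_mem hmBflat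
          rw [List.map_cons] at this
          exact this)
      -- minimality of mB at xA
      have h2 := hB3 xA (by rw [← hkeys]; exact hxAkeys)
      simp only [gmhsLe] at h1 h2
      rw [hg mB, hg xA] at h2
      have heq : xA = mB := by
        rcases h1 with h1 | ⟨h1e, h1le⟩
        · rcases h2 with h2 | ⟨h2e, _⟩
          · exact absurd h2 (by omega)
          · exact absurd h2e (by omega)
        · rcases h2 with h2 | ⟨_, h2le⟩
          · exact absurd h2 (by omega)
          · exact le_antisymm h1le h2le
      simp [heq]

lemma gmhs_ofList_append_singleton (xs : List String) (x : String) :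
    PySem.Set.ofList (xs ++ [x]) = PySem.Set.add (PySem.Set.ofList xs) x := by
  rw [PySem.Set.ofList_eq_foldl, PySem.Set.ofList_eq_foldl, List.foldl_append]
  rfl

-- the two greedy loops run in lockstep: same picks, same uncovered, and the result of B
-- extends chosen and covers every still-uncovered clause
lemma loopAB : ∀ (fuel : Nat) (u : List (PySem.Set String)) (d : PySem.Dict String Int)
    (chosen : List String),
    u.length ≤ fuel →
    (∀ c ∈ u, (c : List String) ≠ [] ∧ (c : List String).Nodup) →
    gmhsFreqInv u d →
    ∃ ext, gmhsLoopB fuel u d chosen = chosen ++ ext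
      ∧ gmhsLoopA fuel u (PySem.Set.ofList chosen) = PySem.Set.ofList (gmhsLoopB fuel u d chosen)
      ∧ (∀ c ∈ u, ∃ a ∈ gmhsLoopB fuel u d chosen, a ∈ (c : List String)) := by
  intro fuel
  induction fuel with
  | zero =>
    intro u d chosen hlen hcl _
    have hu : u = [] := List.length_eq_zero_iff.mp (Nat.le_zero.mp hlen)
    subst hu
    exact ⟨[], by simp [gmhsLoopB], by simp [gmhsLoopA, gmhsLoopB], by simp⟩
  | succ n ih =>
    intro u d chosen hlen hcl hInv
    by_cases hu : u = []
    · subst hu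
      exact ⟨[], by simp [gmhsLoopB], by simp [gmhsLoopA, gmhsLoopB], by simp⟩
    · have hne : u.isEmpty = false := by simp [hu]
      -- B's pick exists
      obtain ⟨c0, u', rfl⟩ := List.exists_cons_of_ne_nil hu
      obtain ⟨a0, ha0⟩ := List.exists_mem_of_ne_nil _ (hcl c0 (by simp)).1
      have ha0flat : a0 ∈ (c0 :: u').flatMap (fun c => c) := by
        rw [List.flatMap_cons]
        exact List.mem_append.mpr (Or.inl ha0)
      have ha0keys : a0 ∈ d.keys := (hInv.2.1 a0).mpr ha0flat
      have hkne : d.keys ≠ [] := fun h => by rw [h] at ha0keys; cases ha0keys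
      obtain ⟨b, kt, hkeys⟩ := List.exists_cons_of_ne_nil hkne
      obtain ⟨best, hB1, hB2, _⟩ := min2?_char (fun a => -(d.getD a 0)) (fun a => a) kt b
      have hpickB : PySem.List.min2? d.keys (fun a => -(d.getD a 0)) (fun a => a) = some best := by
        rw [hkeys]; exact hB1
      -- A's pick is the same attribute
      have hpe := pick_eq (c0 :: u') d hInv
      rw [hpickB] at hpe
      obtain ⟨pA, hpickA, hpA1⟩ : ∃ p, PySem.List.min2? (gmhsFreq (c0 :: u')).items
          (fun it => -it.2) (fun it => it.1) = some p ∧ p.1 = best := by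
        cases hA : PySem.List.min2? (gmhsFreq (c0 :: u')).items (fun it => -it.2)
            (fun it => it.1) with
        | none => rw [hA] at hpe; cases hpe
        | some p => rw [hA] at hpe; exact ⟨p, rfl, by simpa using hpe⟩
      -- best hits some uncovered clause
      have hbestkeys : best ∈ d.keys := by rw [hkeys]; exact hB2
      have hbestflat : best ∈ (c0 :: u').flatMap (fun c => c) := (hInv.2.1 best).mp hbestkeys
      obtain ⟨cb, hcb, hbestcb⟩ := List.mem_flatMap.mp hbestflat
      -- one round of B
      obtain ⟨d', hround, hInv'⟩ := roundB_spec best (c0 :: u') d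
        (fun c hc => (hcl c hc).2) hInv
      -- the filtered list is strictly shorter
      have hflen : ((c0 :: u').filter (fun cl => !(PySem.Set.contains cl best))).length ≤ n := by
        have hlt : ((c0 :: u').filter (fun cl => !(PySem.Set.contains cl best))).length
            < (c0 :: u').length := by
          refine lt_of_le_of_ne (List.length_filter_le _ _) ?_
          intro he
          have hall := List.length_filter_eq_length_iff.mp he
          have := hall cb hcb
          rw [Bool.not_eq_true'] at this
          rw [(PySem.Set.contains_iff cb best).mpr hbestcb] at this
          cases this
        omega
      have hcl' : ∀ c ∈ (c0 :: u').filter (fun cl => !(PySem.Set.contains cl best)),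
          (c : List String) ≠ [] ∧ (c : List String).Nodup :=
        fun c hc => hcl c (List.mem_of_mem_filter hc)
      obtain ⟨ext', hext', heqA', hcov'⟩ := ih
        ((c0 :: u').filter (fun cl => !(PySem.Set.contains cl best))) d' (chosen ++ [best])
        hflen hcl' hInv'
      -- unfold one step of both loops
      have hstepB : gmhsLoopB (n+1) (c0 :: u') d chosen
          = gmhsLoopB n ((c0 :: u').filter (fun cl => !(PySem.Set.contains cl best))) d'
              (chosen ++ [best]) := by
        rw [gmhsLoopB, if_neg (by simp), hpickB]
        simp only [hround]
      have hstepA : gmhsLoopA (n+1) (c0 :: u') (PySem.Set.ofList chosen)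
          = gmhsLoopA n ((c0 :: u').filter (fun cl => !(PySem.Set.contains cl best)))
              (PySem.Set.add (PySem.Set.ofList chosen) best) := by
        rw [gmhsLoopA, if_neg (by simp), hpickA]
        cases pA with
        | mk a v => simp only at hpA1; subst hpA1; rfl
      refine ⟨[best] ++ ext', ?_, ?_, ?_⟩
      · rw [hstepB, hext', List.append_assoc]
      · rw [hstepA, hstepB, ← gmhs_ofList_append_singleton, heqA']
      · intro c hc
        by_cases hcbest : PySem.Set.contains c best = true
        · refine ⟨best, ?_, (PySem.Set.contains_iff c best).mp hcbest⟩
          rw [hstepB, hext']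
          simp
        · have hcf : c ∈ (c0 :: u').filter (fun cl => !(PySem.Set.contains cl best)) :=
            List.mem_filter.mpr ⟨hc, by
              rw [Bool.not_eq_eq_eq_not, Bool.not_true]
              exact eq_false_of_ne_true hcbest⟩
          obtain ⟨a, haB, hac⟩ := hcov' c hcf
          rw [hstepB]
          exact ⟨a, haB, hac⟩

lemma gmhs_contains_eq_decide (s : List String) (x : String) :
    PySem.Set.contains s x = decide (x ∈ s) := by
  by_cases h : x ∈ s
  · rw [(PySem.Set.contains_iff s x).mpr h, decide_eq_true h]
  · have hne : PySem.Set.contains s x ≠ true := fun hc => h ((PySem.Set.contains_iff s x).mp hc)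
    rw [eq_false_of_ne_true hne, decide_eq_false h]

lemma gmhs_zip_map {α β : Type} (cs : List α) (f : α → β) :
    cs.zip (cs.map f) = cs.map (fun c => (c, f c)) := by
  induction cs with
  | nil => rfl
  | cons c t ih => simp [ih]

lemma gmhs_mem_inter (s t : List String) (x : String) :
    x ∈ PySem.Set.inter s t ↔ x ∈ s ∧ x ∈ t := by
  show x ∈ List.filter _ s ↔ _
  rw [List.mem_filter, PySem.Set.contains_iff]

-- intersection against a set with one attribute removed
lemma gmhs_inter_discard (c sel : List String) (a : String) :
    PySem.Set.inter c (sel.filter (fun y => !(y == a)))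
      = (PySem.Set.inter c sel).filter (fun y => !(y == a)) := by
  show c.filter _ = (c.filter _).filter _
  rw [List.filter_filter]
  refine List.filter_congr ?_
  intro x _
  rw [gmhs_contains_eq_decide, gmhs_contains_eq_decide]
  by_cases hxa : x = a
  · subst hxa; simp [List.mem_filter]
  · simp [List.mem_filter, hxa]

lemma gmhs_len_inter_discard (c sel : List String) (a : String) (hc : c.Nodup) :
    (PySem.Set.inter c (sel.filter (fun y => !(y == a)))).length
      = if a ∈ (c : List String) ∧ a ∈ sel
        then (PySem.Set.inter c sel).length - 1 else (PySem.Set.inter c sel).length := by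
  rw [gmhs_inter_discard]
  have hFnd : (PySem.Set.inter c sel).Nodup := hc.filter _
  have hfe : (PySem.Set.inter c sel).filter (fun y => !(y == a))
      = (PySem.Set.inter c sel).erase a := by
    rw [hFnd.erase_eq_filter a]
    exact List.filter_congr (fun x _ => rfl)
  rw [hfe]
  by_cases hmem : a ∈ PySem.Set.inter c sel
  · rw [if_pos ((gmhs_mem_inter c sel a).mp hmem), List.length_erase_of_mem hmem]
  · have hnot : ¬(a ∈ (c : List String) ∧ a ∈ sel) := by
      intro h
      exact hmem ((gmhs_mem_inter c sel a).mpr h)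
    rw [if_neg hnot, List.erase_of_not_mem hmem]

-- per-clause equivalence of A's emptiness test and B's counter threshold
lemma gmhs_clause_cond (c sel : List String) (a : String) (hc : c.Nodup) (hasel : a ∈ sel)
    (hhit : ∃ x, x ∈ sel ∧ x ∈ c) :
    (!(PySem.Set.inter (sel.filter (fun y => !(y == a))) c).isEmpty) = true
      ↔ (a ∈ c → 2 ≤ (PySem.Set.inter c sel).length) := by
  have hFnd : (PySem.Set.inter c sel).Nodup := hc.filter _
  have hmemF : ∀ x, x ∈ PySem.Set.inter c sel ↔ x ∈ c ∧ x ∈ sel :=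
    fun x => gmhs_mem_inter c sel x
  have hlhs : (!(PySem.Set.inter (sel.filter (fun y => !(y == a))) c).isEmpty) = true
      ↔ ∃ x, x ∈ sel ∧ x ≠ a ∧ x ∈ c := by
    rw [Bool.not_eq_true', List.isEmpty_eq_false_iff]
    constructor
    · intro h
      obtain ⟨x, hx⟩ := List.exists_mem_of_ne_nil _ h
      obtain ⟨hx1, hx2⟩ := (gmhs_mem_inter _ _ x).mp hx
      obtain ⟨hx3, hx4⟩ := List.mem_filter.mp hx1
      refine ⟨x, hx3, ?_, hx2⟩
      simpa using hx4
    · rintro ⟨x, hx1, hx2, hx3⟩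
      intro h0
      have hxin : x ∈ PySem.Set.inter (sel.filter (fun y => !(y == a))) c :=
        (gmhs_mem_inter _ _ x).mpr ⟨List.mem_filter.mpr ⟨hx1, by simpa using hx2⟩, hx3⟩
      rw [h0] at hxin
      cases hxin
  rw [hlhs]
  constructor
  · rintro ⟨x, hx1, hx2, hx3⟩ hac
    have hxF : x ∈ PySem.Set.inter c sel := (hmemF x).mpr ⟨hx3, hx1⟩
    have haF : a ∈ PySem.Set.inter c sel := (hmemF a).mpr ⟨hac, hasel⟩
    have hxE : x ∈ (PySem.Set.inter c sel).erase a := (hFnd.mem_erase_iff).mpr ⟨hx2, hxF⟩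
    have h1 : 0 < ((PySem.Set.inter c sel).erase a).length := List.length_pos_of_mem hxE
    have h2 := List.length_erase_of_mem haF
    omega
  · intro h
    by_cases hac : a ∈ c
    · have h2 := h hac
      have haF : a ∈ PySem.Set.inter c sel := (hmemF a).mpr ⟨hac, hasel⟩
      have h3 := List.length_erase_of_mem haF
      have hpos : 0 < ((PySem.Set.inter c sel).erase a).length := by omega
      obtain ⟨x, hx⟩ := List.exists_mem_of_ne_nil _ (List.ne_nil_of_length_pos hpos)
      obtain ⟨hxa, hxF⟩ := hFnd.mem_erase_iff.mp hx
      obtain ⟨hxc, hxsel⟩ := (hmemF x).mp hxF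
      exact ⟨x, hxsel, hxa, hxc⟩
    · obtain ⟨x, hx1, hx2⟩ := hhit
      exact ⟨x, hx1, fun he => hac (he ▸ hx2), hx2⟩

-- the two minimization passes agree step by step
lemma pruneAB (cs : List (PySem.Set String)) (hcsnd : ∀ c ∈ cs, (c : List String).Nodup) :
    ∀ (l : List String) (sel : List String),
    sel.Nodup → l.Nodup → (∀ x ∈ l, x ∈ sel) →
    (∀ c ∈ cs, ∃ x, x ∈ sel ∧ x ∈ (c : List String)) →
    l.foldl (fun sel attr =>
      match PySem.Set.remove? (PySem.Set.ofList sel) attr with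
      | none => sel
      | some candidate => if gmhsIsHittingSet candidate cs then candidate else sel) sel
    = (l.foldl (gmhsPruneStepB cs)
        (sel, cs.map (fun c => PySem.Set.len (PySem.Set.inter c sel)))).1 := by
  intro l
  induction l with
  | nil => intro sel _ _ _ _; rfl
  | cons a l' ih =>
    intro sel hseln hln hlsel hhit
    have ha : a ∈ sel := hlsel a (by simp)
    have hremove : PySem.Set.remove? (PySem.Set.ofList sel) a
        = some (sel.filter (fun y => !(y == a))) := by
      rw [PySem.Set.ofList_eq_self_of_nodup sel hseln, PySem.Set.remove?_of_mem ha]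
      rfl
    -- B's condition in clause form
    have hBcond : (((cs.zip (cs.map (fun c => PySem.Set.len (PySem.Set.inter c sel)))).filter
          (fun p => PySem.Set.contains p.1 a)).all (fun p => decide (2 ≤ p.2))) = true
        ↔ ∀ c ∈ cs, a ∈ (c : List String) →
            2 ≤ (PySem.Set.inter c sel).length := by
      rw [gmhs_zip_map, List.filter_map, List.all_map, List.all_eq_true]
      constructor
      · intro h c hc hac
        have := h c (List.mem_filter.mpr ⟨hc, by
          show PySem.Set.contains c a = true
          exact (PySem.Set.contains_iff c a).mpr hac⟩)
        simp only [Function.comp, PySem.Set.len, decide_eq_true_eq] at this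
        omega
      · intro h c hcf
        obtain ⟨hc, hca⟩ := List.mem_filter.mp hcf
        have := h c hc ((PySem.Set.contains_iff c a).mp hca)
        simp only [Function.comp, PySem.Set.len, decide_eq_true_eq]
        omega
    -- A's condition in clause form
    have hAcond : gmhsIsHittingSet (sel.filter (fun y => !(y == a))) cs = true
        ↔ ∀ c ∈ cs, a ∈ (c : List String) →
            2 ≤ (PySem.Set.inter c sel).length := by
      rw [gmhsIsHittingSet, List.all_eq_true]
      constructor
      · intro h c hc hac
        exact (gmhs_clause_cond c sel a (hcsnd c hc) ha (hhit c hc)).mp (h c hc) hac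
      · intro h c hc
        exact (gmhs_clause_cond c sel a (hcsnd c hc) ha (hhit c hc)).mpr (h c hc)
    have hcond : (((cs.zip (cs.map (fun c => PySem.Set.len (PySem.Set.inter c sel)))).filter
          (fun p => PySem.Set.contains p.1 a)).all (fun p => decide (2 ≤ p.2)))
        = gmhsIsHittingSet (sel.filter (fun y => !(y == a))) cs := by
      rw [Bool.eq_iff_iff, hBcond, hAcond]
    rw [List.foldl_cons, List.foldl_cons]
    simp only [hremove, gmhsPruneStepB, hcond]
    by_cases hA : gmhsIsHittingSet (sel.filter (fun y => !(y == a))) cs = true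
    · rw [if_pos hA, if_pos hA]
      have hselR : (sel.filter (fun y => !(y == a))).Nodup := hseln.filter _
      have hl' : ∀ x ∈ l', x ∈ sel.filter (fun y => !(y == a)) := by
        intro x hx
        refine List.mem_filter.mpr ⟨hlsel x (by simp [hx]), ?_⟩
        have hxa : x ≠ a := by
          intro he
          subst he
          exact (List.nodup_cons.mp hln).1 hx
        simpa using hxa
      have hhit' : ∀ c ∈ cs, ∃ x, x ∈ sel.filter (fun y => !(y == a)) ∧ x ∈ (c : List String) := by
        intro c hc
        have hA' := hA
        rw [gmhsIsHittingSet, List.all_eq_true] at hA'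
        have hce := hA' c hc
        rw [Bool.not_eq_true', List.isEmpty_eq_false_iff] at hce
        obtain ⟨x, hx⟩ := List.exists_mem_of_ne_nil _ hce
        obtain ⟨hx1, hx2⟩ := (gmhs_mem_inter _ _ x).mp hx
        exact ⟨x, hx1, hx2⟩
      have hhits' : (cs.zip (cs.map (fun c => PySem.Set.len (PySem.Set.inter c sel)))).map
            (fun p => if PySem.Set.contains p.1 a then p.2 - 1 else p.2)
          = cs.map (fun c => PySem.Set.len
              (PySem.Set.inter c (sel.filter (fun y => !(y == a))))) := by
        rw [gmhs_zip_map, List.map_map]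
        refine List.map_congr_left ?_
        intro c hc
        simp only [Function.comp, PySem.Set.len]
        have hlen := gmhs_len_inter_discard c sel a (hcsnd c hc)
        by_cases hca : a ∈ (c : List String)
        · have hct : PySem.Set.contains c a = true := (PySem.Set.contains_iff c a).mpr hca
          have hlen1 : (PySem.Set.inter c (sel.filter (fun y => !(y == a)))).length
              = (PySem.Set.inter c sel).length - 1 := by
            rw [hlen]; exact if_pos ⟨hca, ha⟩
          have h2 := (hAcond.mp hA) c hc hca
          rw [hct, if_pos rfl, hlen1]
          omega
        · have hcf : PySem.Set.contains c a = false :=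
            eq_false_of_ne_true (fun hc' => hca ((PySem.Set.contains_iff c a).mp hc'))
          have hlen0 : (PySem.Set.inter c (sel.filter (fun y => !(y == a)))).length
              = (PySem.Set.inter c sel).length := by
            rw [hlen]; exact if_neg (fun h => hca h.1)
          rw [hcf, if_neg (by simp), hlen0]
      rw [hhits']
      exact ih (sel.filter (fun y => !(y == a))) hselR hln.of_cons hl' hhit'
    · rw [if_neg hA, if_neg hA]
      exact ih sel hseln hln.of_cons (fun x hx => hlsel x (by simp [hx])) hhit

theorem greedy_minimal_hitting_set_py_spec : Claim_equal_greedy_minimal_hitting_set_py := by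
  intro clauses _
  unfold Spec_greedy_minimal_hitting_set_py
  unfold greedy_minimal_hitting_set_py greedy_minimal_hitting_set_py_alt
  simp only []
  set cs := (clauses.filter (fun c => !c.isEmpty)).map (fun c => PySem.Set.ofList c) with hcs
  by_cases h : cs.isEmpty
  · simp [h]
  · simp only [h, Bool.false_eq_true, if_false]
    have hnd : ∀ c ∈ cs, (c : List String).Nodup := by
      intro c hc
      obtain ⟨c', _, rfl⟩ := List.mem_map.mp hc
      exact PySem.Set.nodup_ofList c'
    have hnonempty : ∀ c ∈ cs, (c : List String) ≠ [] := by
      intro c hc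
      obtain ⟨c', hc', rfl⟩ := List.mem_map.mp hc
      have hne : c' ≠ [] := by
        have := (List.mem_filter.mp hc').2
        simpa [List.isEmpty_iff] using this
      obtain ⟨y, hy⟩ := List.exists_mem_of_ne_nil _ hne
      intro h0
      have hym : y ∈ PySem.Set.ofList c' := (PySem.Set.mem_ofList _ _).mpr hy
      rw [h0] at hym
      cases hym
    obtain ⟨ext, hextB, heqA, hcov⟩ := loopAB cs.length cs (gmhsFreqB cs) [] (le_refl _)
      (fun c hc => ⟨hnonempty c hc, hnd c hc⟩) (gmhsFreqB_inv cs)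
    set chosen := gmhsLoopB cs.length cs (gmhsFreqB cs) [] with hchosen
    have hsel : gmhsLoopA cs.length cs PySem.Set.empty = PySem.Set.ofList chosen := heqA
    have hkeepnd : (PySem.Set.ofList chosen : List String).Nodup := PySem.Set.nodup_ofList chosen
    have hl_nodup : (PySem.List.sorted (PySem.Set.ofList chosen) (fun x => x) false).Nodup :=
      (PySem.List.sorted_perm (PySem.Set.ofList chosen) (fun x => x) false).symm.nodup hkeepnd
    have hl_mem : ∀ x ∈ PySem.List.sorted (PySem.Set.ofList chosen) (fun x => x) false,
        x ∈ (PySem.Set.ofList chosen : List String) :=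
      fun x hx => (PySem.List.mem_sorted _ _ _ _).mp hx
    have hhit : ∀ c ∈ cs, ∃ x, x ∈ (PySem.Set.ofList chosen : List String)
        ∧ x ∈ (c : List String) := by
      intro c hc
      obtain ⟨a, haB, hac⟩ := hcov c hc
      exact ⟨a, (PySem.Set.mem_ofList _ _).mpr haB, hac⟩
    have hprune := pruneAB cs hnd (PySem.List.sorted (PySem.Set.ofList chosen) (fun x => x) false)
      (PySem.Set.ofList chosen) hkeepnd hl_nodup hl_mem hhit
    rw [hsel, gmhsPruneA, hprune]
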